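-- pv_equiv track=rewrite | github.com/Diego-Santiago-Gutierrez/Data-Structure-and-Algorithms | Practica 4/practica04.py | findClosestNeighbors
-- ===== SOURCE A (Python) =====
-- import math
--
-- def BusqBinRec(A, x, izq, der): #Busqueda binaria recibe el arreglo, el elemento a buscar, el inicio del arreglo y el final del mismo.
--     if izq>der: #Si izquierda es mayor a derecha , quiere decir que el arreglo no esta lleno o tiene un elemento
--         return izq # Regresa un menos uno . es decir un none
--
--     medio = (izq+der)//2 #Sacamos el medio del arreglo
--     if x == A[medio]: # Si el valor x que estamos buscando es igual al elemento del medio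
--         return medio #Se retornara el valor del medio (indice)
--
--     if x > A[medio]: #Si el valor que buscamos es mayor al valor del medio, se buscara por el lado derecho
--         return BusqBinRec(A, x, medio+1, der) #Retoramos el valor de la funcion pero ahora dandole el valor del inicio, se le da la mitad del arreglo y buscará hasta el final del mismo
--     else:
--         return BusqBinRec(A, x, izq, medio-1) #De lo contrario se buscara del medio a la izquierda del programa
--
-- def BinarioModificacion(A, x):
--     return BusqBinRec(A, x,  0, len(A) - 1)
--
-- def findClosestNeighbors(A, num, max, busqueda):
--
--     A = A.copy() # hacemos una copia del arreglo
--     A.sort()  # Arreglamos el arreglo en caso de no estarlo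
--     index = BinarioModificacion(A, busqueda) #Copiamos el indice del valor devuelto
--     vecinos = [] #Creamos el arreglo con el que llenaremos de vecinos
--
--     def distancias(idx):              #Calculamos las distancias si son menor al radio
--         return abs(A[idx] - busqueda) #Regresamos el valor de dicha operacion
--
--     leftPointer = index - 1 #Elemento por la izquierda
--     rightPointer = index #Elemento por la derecha
--
--     # Diferencia entre los elementos anteriores
--     # y el elemento buscado
--     difDer = distancias(rightPointer) #Calculamos la distancia del puntero a la derecha
--     difIzq = math.inf #Sacamos math.ing a difIzq
--     if leftPointer >= 0: #Si el puntero es mayor a 0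
--         difIzq = distancias(leftPointer) #difIzq será la distancia que hay con el punteroizquierdo
--
--     while len(vecinos) < num and (difIzq <= max or difDer <= max):
--     #Si el tamaño de vecinos es menor al numero }
--     #Solicitado y que sean menor o mayor al rango por izq o derecha
--     #ambos vecinos candidatos están dentro del rango
--
--
--         if difIzq <= difDer:  # La distancia al vecino izquierdo es menor o igual
--             vecinos.append(A[leftPointer]) #Insertas el valor en el arreglo
--             leftPointer -= 1 #Recorres un valor a la izquierda
--
--             if leftPointer == -1: #Si te sales del arreglo
--                 difIzq = math.inf #invalidas el lado
--             else:
--                 difIzq = distancias(leftPointer) #La diferencia de la distancia con el puntero izquierda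
--
--         else: # La distancia al vecino derecho es mayor
--             vecinos.append(A[rightPointer]) #Insertar el valor que se encuentra en el puntero derecho a vecinos
--             rightPointer += 1 #Incrementas el valor
--
--             if rightPointer == len(A): #si se llega al final
--                 difDer = math.inf #invalidas el valor
--             else:
--                 difDer = distancias(rightPointer) #Regresas el valor de la distancai con respecto al puntero derecha
--
--     vecinos.sort() #Acomodas el arreglo
--     return vecinos #Retornas el valor
-- ===== SOURCE B (Python) =====
-- def findClosestNeighbors(A, num, max, busqueda):
--     # Select up to num elements within distance max of busqueda, closest first
--     # (ties broken toward the smaller value), then return them in ascending order.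
--     cand = sorted((abs(a - busqueda), a) for a in A if abs(a - busqueda) <= max)
--     k = num if num > 0 else 0
--     return sorted(a for _, a in cand[:k])
-- ===== Notes on version B (the rewrite author's own statement) =====
-- stated objective: simpler
-- what changed: A sorts, hand-rolls a recursive binary search and expands two pointers with +/-inf sentinels; B is a 3-line select: filter the values within max, sort them by the (distance, value) tuple key, take the first num, and sort the selection.
-- crash fix: A raises an IndexError (A[index] with index == len(A)) when the list is empty or every element is smaller than busqueda; B returns the filtered selection there (e.g. [] for an empty list). — e.g. on findClosestNeighbors([1, 2], 2, 5, 4): A raises IndexError, B returns [1, 2]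
import Mathlib
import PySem

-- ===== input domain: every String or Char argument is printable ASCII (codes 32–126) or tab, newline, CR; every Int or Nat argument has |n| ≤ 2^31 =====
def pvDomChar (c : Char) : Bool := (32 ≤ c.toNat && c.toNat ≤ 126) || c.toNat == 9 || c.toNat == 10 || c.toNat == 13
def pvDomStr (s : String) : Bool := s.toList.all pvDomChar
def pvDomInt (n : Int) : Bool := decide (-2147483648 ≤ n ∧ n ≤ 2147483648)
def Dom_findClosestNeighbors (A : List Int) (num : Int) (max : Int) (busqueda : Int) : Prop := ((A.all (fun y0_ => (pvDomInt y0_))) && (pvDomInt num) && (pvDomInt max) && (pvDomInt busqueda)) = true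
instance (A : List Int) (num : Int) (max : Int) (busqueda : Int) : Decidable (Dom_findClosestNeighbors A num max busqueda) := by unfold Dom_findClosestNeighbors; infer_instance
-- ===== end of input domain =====

-- B replaces A's sort + recursive binary search + two-pointer expansion by a plain
-- filter / sort-by-(distance,value) / take-num selection (same O(n log n) cost, much shorter).


-- ===== PORT A =====
-- Recursive binary search; A[medio] is PySem.List.pyGet? (the none branch is never
-- reached from BinarioModificacion's calls, which keep 0 ≤ izq ≤ der < len A).
def BusqBinRec (A : List Int) (x : Int) (izq : Int) (der : Int) : Int :=
  if izq > der then izq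
  else
    let medio := PySem.Int.floordiv (izq + der) 2
    match PySem.List.pyGet? A medio with
    | some v =>
      if x = v then medio
      else if x > v then BusqBinRec A x (medio + 1) der
      else BusqBinRec A x izq (medio - 1)
    | none => medio
termination_by (der + 1 - izq).toNat
decreasing_by
  · have h := PySem.Int.floordiv_two_mid_bounds (by omega : izq ≤ der); omega
  · have h := PySem.Int.floordiv_two_mid_bounds (by omega : izq ≤ der); omega

def BinarioModificacion (A : List Int) (x : Int) : Int :=
  BusqBinRec A x 0 ((A.length : Int) - 1)

-- distancias(idx) = abs(A[idx] - busqueda); none where Python's A[idx] would raise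
def pvDist? (As : List Int) (busqueda : Int) (idx : Int) : Option Int :=
  (PySem.List.pyGet? As idx).map (fun v => |v - busqueda|)

-- difIzq <= difDer, with none playing math.inf (inf <= inf is True in Python)
def pvLeInf : Option Int → Option Int → Bool
  | some a, some b => a ≤ b
  | some _, none => true
  | none, some _ => false
  | none, none => true

-- dif <= max, with none playing math.inf
def pvLeMax : Option Int → Int → Bool
  | some v, m => v ≤ m
  | none, _ => false

-- the while loop; fuel = num.toNat is exact: every iteration appends one element and
-- requires len(vecinos) < num, so the loop body runs at most num.toNat times
def fcnLoop (As : List Int) (num mx busqueda : Int) :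
    Nat → List Int → Int → Int → Option Int → Option Int → List Int
  | 0, vec, _, _, _, _ => vec
  | fuel + 1, vec, lp, rp, dI, dD =>
    if (vec.length : Int) < num && (pvLeMax dI mx || pvLeMax dD mx) then
      if pvLeInf dI dD then
        fcnLoop As num mx busqueda fuel (vec ++ [PySem.List.pyGetD As lp 0]) (lp - 1) rp
          (if lp - 1 = -1 then none else pvDist? As busqueda (lp - 1)) dD
      else
        fcnLoop As num mx busqueda fuel (vec ++ [PySem.List.pyGetD As rp 0]) lp (rp + 1)
          dI (if rp + 1 = (As.length : Int) then none else pvDist? As busqueda (rp + 1))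
    else vec

def findClosestNeighbors (A : List Int) (num : Int) (max : Int) (busqueda : Int) : List Int :=
  let As := PySem.List.sorted A (fun a => a)
  let index := BinarioModificacion As busqueda
  let leftPointer := index - 1
  let rightPointer := index
  let difDer := pvDist? As busqueda rightPointer
  let difIzq := if leftPointer ≥ 0 then pvDist? As busqueda leftPointer else none
  PySem.List.sorted
    (fcnLoop As num max busqueda num.toNat [] leftPointer rightPointer difIzq difDer)
    (fun a => a)

-- ===== PORT B =====
-- B sorts a list of tuples; Python compares tuples lexicographically, hence the toLex key.
def findClosestNeighbors_alt (A : List Int) (num : Int) (max : Int) (busqueda : Int) : List Int :=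
  let cand := PySem.List.sorted
    ((A.filter (fun a => decide (|a - busqueda| ≤ max))).map (fun a => (|a - busqueda|, a)))
    (fun p => toLex p)
  let k := if num > 0 then num else 0
  -- cand[:k] with k ≥ 0 is List.take k.toNat
  PySem.List.sorted ((cand.take k.toNat).map (fun p => p.2)) (fun a => a)

-- ===== PRECONDITION & SPEC =====
-- Pre_ excludes exactly the inputs where Python's A raises: distancias(rightPointer)
-- evaluates A[len(A)] (IndexError) iff the list is empty or every element is < busqueda.
def Pre_findClosestNeighbors (A : List Int) (num : Int) (max : Int) (busqueda : Int) : Prop :=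
  A ≠ [] ∧ ∃ a ∈ A, busqueda ≤ a
instance (A : List Int) (num : Int) (max : Int) (busqueda : Int) :
    Decidable (Pre_findClosestNeighbors A num max busqueda) := by
  unfold Pre_findClosestNeighbors; infer_instance

def pvWitness_findClosestNeighbors : List Int × Int × Int × Int := ([3, 1, 2], 2, 1, 2)

-- A raises IndexError when the list is empty or every element is smaller than busqueda;
-- B returns the (possibly empty) filtered selection there (theorem findClosestNeighbors_raises below).
def Raises_findClosestNeighbors (A : List Int) (num : Int) (max : Int) (busqueda : Int) : Prop :=
  A = [] ∨ ∀ a ∈ A, a < busqueda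
instance (A : List Int) (num : Int) (max : Int) (busqueda : Int) :
    Decidable (Raises_findClosestNeighbors A num max busqueda) := by
  unfold Raises_findClosestNeighbors; infer_instance

def pvRaiseWitness_findClosestNeighbors : List Int × Int × Int × Int := ([1, 2], 2, 5, 4)
def pvRaiseWitnessOut_findClosestNeighbors : List Int := [1, 2]

def Spec_findClosestNeighbors (A : List Int) (num : Int) (max : Int) (busqueda : Int) (out : List Int) : Prop := out = findClosestNeighbors_alt A num max busqueda
instance (A : List Int) (num : Int) (max : Int) (busqueda : Int) (out : List Int) : Decidable (Spec_findClosestNeighbors A num max busqueda out) := by unfold Spec_findClosestNeighbors; infer_instance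

-- ===== CLAIM (what is proved, stated in full; the proofs are below) =====
def Claim_equal_findClosestNeighbors : Prop := ∀ (A : List Int) (num : Int) (max : Int) (busqueda : Int), Dom_findClosestNeighbors A num max busqueda → Pre_findClosestNeighbors A num max busqueda → Spec_findClosestNeighbors A num max busqueda (findClosestNeighbors A num max busqueda)

def Claim_raises_findClosestNeighbors : Prop := (∀ (A : List Int) (num : Int) (max : Int) (busqueda : Int), Dom_findClosestNeighbors A num max busqueda → Raises_findClosestNeighbors A num max busqueda → ¬ Pre_findClosestNeighbors A num max busqueda) ∧ (Dom_findClosestNeighbors (pvRaiseWitness_findClosestNeighbors.1) (pvRaiseWitness_findClosestNeighbors.2.1) (pvRaiseWitness_findClosestNeighbors.2.2.1) (pvRaiseWitness_findClosestNeighbors.2.2.2) ∧ Raises_findClosestNeighbors (pvRaiseWitness_findClosestNeighbors.1) (pvRaiseWitness_findClosestNeighbors.2.1) (pvRaiseWitness_findClosestNeighbors.2.2.1) (pvRaiseWitness_findClosestNeighbors.2.2.2) ∧ findClosestNeighbors_alt (pvRaiseWitness_findClosestNeighbors.1) (pvRaiseWitness_findClosestNeighbors.2.1) (pvRaiseWitness_findClosestNeighbors.2.2.1)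 (pvRaiseWitness_findClosestNeighbors.2.2.2) = pvRaiseWitnessOut_findClosestNeighbors)


-- ===== LEMMAS AND PROOFS =====

-- xs[i] for a non-negative in-range index
theorem pvGetPos (xs : List Int) (i : Int) (h0 : 0 ≤ i) (h1 : i < xs.length) :
    PySem.List.pyGet? xs i = some (xs.getD i.toNat 0) := by
  have hi : i.toNat < xs.length := by omega
  simp [PySem.List.pyGet?, PySem.List.pyIdx?, h0, h1, List.getD_eq_getElem?_getD]

theorem pvGetDPos (xs : List Int) (i : Int) (h0 : 0 ≤ i) (h1 : i < xs.length) :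
    PySem.List.pyGetD xs i 0 = xs.getD i.toNat 0 := by
  have hi : i.toNat < xs.length := by omega
  rw [PySem.List.pyGetD_eq_getElem xs 0 h0 h1]
  simp [List.getD_eq_getElem?_getD, List.getElem?_eq_getElem hi]

theorem pvMono (xs : List Int) (hs : xs.Pairwise (· ≤ ·)) (i j : Nat) (hij : i ≤ j)
    (hj : j < xs.length) : xs.getD i 0 ≤ xs.getD j 0 := by
  rcases Nat.eq_or_lt_of_le hij with rfl | hlt
  · exact le_refl _
  · have := (List.pairwise_iff_getElem.mp hs) i j (by omega) hj hlt
    simpa [List.getD_eq_getElem?_getD, List.getElem?_eq_getElem, hj,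
      (by omega : i < xs.length)] using this

-- full characterisation of the recursive binary search on a sorted list
theorem pvBsSpec (As : List Int) (x : Int) (hs : As.Pairwise (· ≤ ·)) :
    ∀ (k : Nat) (izq der : Int), (der + 1 - izq).toNat ≤ k →
    0 ≤ izq → izq ≤ der + 1 → der < (As.length : Int) →
    (∀ i : Nat, i < As.length → (i : Int) < izq → As.getD i 0 < x) →
    (∀ i : Nat, i < As.length → der < (i : Int) → x < As.getD i 0) →
    (izq ≤ BusqBinRec As x izq der ∧ BusqBinRec As x izq der ≤ der + 1) ∧
    ((0 ≤ BusqBinRec As x izq der ∧ BusqBinRec As x izq der < (As.length : Int) ∧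
        As.getD (BusqBinRec As x izq der).toNat 0 = x) ∨
      ((∀ i : Nat, i < As.length → (i : Int) < BusqBinRec As x izq der → As.getD i 0 < x) ∧
       (∀ i : Nat, i < As.length → BusqBinRec As x izq der ≤ (i : Int) → x < As.getD i 0))) := by
  intro k
  induction k with
  | zero =>
    intro izq der hk h0 hle hd hl hr
    have hgt : izq > der := by omega
    rw [BusqBinRec]
    simp only [hgt, if_pos]
    refine ⟨⟨le_refl _, by omega⟩, Or.inr ⟨hl, ?_⟩⟩
    intro i hi hgei
    exact hr i hi (by omega)
  | succ k ih =>
    intro izq der hk h0 hle hd hl hr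
    rw [BusqBinRec]
    by_cases hgt : izq > der
    · simp only [hgt, if_pos]
      refine ⟨⟨le_refl _, by omega⟩, Or.inr ⟨hl, ?_⟩⟩
      intro i hi hgei
      exact hr i hi (by omega)
    · simp only [hgt, if_false]
      have hled : izq ≤ der := by omega
      obtain ⟨hm1, hm2⟩ := PySem.Int.floordiv_two_mid_bounds (hled : izq ≤ der)
      set medio := PySem.Int.floordiv (izq + der) 2 with hmdef
      have hmn : medio < (As.length : Int) := by omega
      have hm0 : 0 ≤ medio := by omega
      rw [pvGetPos As medio hm0 hmn]
      simp only
      by_cases hx : x = As.getD medio.toNat 0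
      · rw [if_pos hx]
        exact ⟨⟨hm1, by omega⟩, Or.inl ⟨hm0, hmn, hx.symm⟩⟩
      · rw [if_neg hx]
        by_cases hgt2 : x > As.getD medio.toNat 0
        · rw [if_pos hgt2]
          have hl' : ∀ i : Nat, i < As.length → (i : Int) < medio + 1 → As.getD i 0 < x := by
            intro i hi hilt
            have : As.getD i 0 ≤ As.getD medio.toNat 0 :=
              pvMono As hs i medio.toNat (by omega) (by omega)
            omega
          obtain ⟨⟨hb1, hb2⟩, hres⟩ := ih (medio + 1) der (by omega) (by omega) (by omega) hd hl' hr
          exact ⟨⟨by omega, by omega⟩, hres⟩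
        · rw [if_neg hgt2]
          have hr' : ∀ i : Nat, i < As.length → medio - 1 < (i : Int) → x < As.getD i 0 := by
            intro i hi hilt
            have : As.getD medio.toNat 0 ≤ As.getD i 0 :=
              pvMono As hs medio.toNat i (by omega) hi
            omega
          obtain ⟨⟨hb1, hb2⟩, hres⟩ := ih izq (medio - 1) (by omega) h0 (by omega) (by omega) hl hr'
          exact ⟨⟨by omega, by omega⟩, hres⟩

theorem pvIndexSpec (As : List Int) (x : Int) (hs : As.Pairwise (· ≤ ·)) :
    0 ≤ BinarioModificacion As x ∧ BinarioModificacion As x ≤ (As.length : Int) ∧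
    (∀ i : Nat, i < As.length → (i : Int) < BinarioModificacion As x → As.getD i 0 ≤ x) ∧
    (∀ i : Nat, i < As.length → BinarioModificacion As x ≤ (i : Int) → x ≤ As.getD i 0) ∧
    ((∃ a ∈ As, x ≤ a) → BinarioModificacion As x < (As.length : Int)) := by
  have hspec := pvBsSpec As x hs As.length 0 ((As.length : Int) - 1) (by omega) (by omega)
    (by omega) (by omega) (by intro i hi h; omega) (by intro i hi h; omega)
  unfold BinarioModificacion
  obtain ⟨⟨hb1, hb2⟩, hres⟩ := hspec
  set j := BusqBinRec As x 0 ((As.length : Int) - 1) with hjdef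
  rcases hres with ⟨hj0, hjn, hjx⟩ | ⟨hL, hR⟩
  · refine ⟨hj0, by omega, ?_, ?_, fun _ => hjn⟩
    · intro i hi hij
      have := pvMono As hs i j.toNat (by omega) (by omega)
      omega
    · intro i hi hij
      have := pvMono As hs j.toNat i (by omega) hi
      omega
  · refine ⟨by omega, by omega, ?_, ?_, ?_⟩
    · intro i hi hij; exact le_of_lt (hL i hi hij)
    · intro i hi hij; exact le_of_lt (hR i hi hij)
    · rintro ⟨a, ha, hax⟩
      by_contra hjge
      obtain ⟨i, hi, rfl⟩ := List.getElem_of_mem ha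
      have hgi : As.getD i 0 = As[i] := by
        simp [List.getD_eq_getElem?_getD, List.getElem?_eq_getElem hi]
      have := hL i hi (by omega)
      omega

-- ---- the two-pointer loop versus the sorted candidate list ----

-- the loop's difIzq / difDer as functions of the pointers
def pvCdI (As : List Int) (x lp : Int) : Option Int :=
  if 0 ≤ lp then some (|As.getD lp.toNat 0 - x|) else none

def pvCdD (As : List Int) (x rp : Int) : Option Int :=
  if rp < (As.length : Int) then some (|As.getD rp.toNat 0 - x|) else none

-- the loop with the accumulator stripped: the sequence of appended values
def pvEmit (As : List Int) (mx x : Int) : Nat → Int → Int → List Int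
  | 0, _, _ => []
  | f + 1, lp, rp =>
    if pvLeMax (pvCdI As x lp) mx || pvLeMax (pvCdD As x rp) mx then
      if pvLeInf (pvCdI As x lp) (pvCdD As x rp) then
        As.getD lp.toNat 0 :: pvEmit As mx x f (lp - 1) rp
      else
        As.getD rp.toNat 0 :: pvEmit As mx x f lp (rp + 1)
    else []

-- loop invariant on the pointers
def pvW (As : List Int) (x lp rp : Int) : Prop :=
  -1 ≤ lp ∧ lp < rp ∧ rp ≤ (As.length : Int) ∧
  (∀ i : Nat, i < As.length → (i : Int) ≤ lp → As.getD i 0 ≤ x) ∧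
  (∀ i : Nat, i < As.length → rp ≤ (i : Int) → x ≤ As.getD i 0)

-- the elements not yet consumed by the two pointers
def pvWin (As : List Int) (lp rp : Int) : List Int :=
  As.take (lp + 1).toNat ++ As.drop rp.toNat

def pvCand (As : List Int) (mx x lp rp : Int) : List Int :=
  (pvWin As lp rp).filter (fun a => decide (|a - x| ≤ mx))

-- the candidates of the window, sorted by the Python tuple key (distance, value)
def pvSW (As : List Int) (mx x lp rp : Int) : List (Int × Int) :=
  PySem.List.sorted ((pvCand As mx x lp rp).map (fun a => (|a - x|, a))) (fun p => toLex p)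

theorem pvWinPermL (As : List Int) (lp rp : Int) (h0 : 0 ≤ lp) (hn : lp < (As.length : Int)) :
    (pvWin As lp rp).Perm (As.getD lp.toNat 0 :: pvWin As (lp - 1) rp) := by
  unfold pvWin
  have h1 : (lp + 1).toNat = lp.toNat + 1 := by omega
  have h2 : (lp - 1 + 1).toNat = lp.toNat := by omega
  have hlt : lp.toNat < As.length := by omega
  rw [h1, h2, List.take_succ, List.getElem?_eq_getElem hlt]
  have hg : As[lp.toNat] = As.getD lp.toNat 0 := by
    simp [List.getD_eq_getElem?_getD, List.getElem?_eq_getElem hlt]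
  rw [hg]
  simpa [List.append_assoc] using
    (List.perm_middle (a := As.getD lp.toNat 0) (l₁ := As.take lp.toNat) (l₂ := As.drop rp.toNat))

theorem pvWinPermR (As : List Int) (lp rp : Int) (h0 : 0 ≤ rp) (hn : rp < (As.length : Int)) :
    (pvWin As lp rp).Perm (As.getD rp.toNat 0 :: pvWin As lp (rp + 1)) := by
  unfold pvWin
  have hlt : rp.toNat < As.length := by omega
  have h2 : (rp + 1).toNat = rp.toNat + 1 := by omega
  have hg : As[rp.toNat] = As.getD rp.toNat 0 := by
    simp [List.getD_eq_getElem?_getD, List.getElem?_eq_getElem hlt]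
  rw [h2, List.drop_eq_getElem_cons hlt, hg]
  exact List.perm_middle

-- membership in the window, as an index statement
theorem pvWinMem (As : List Int) (lp rp : Int) (b : Int) (hb : b ∈ pvWin As lp rp) :
    (∃ i : Nat, i < As.length ∧ (i : Int) ≤ lp ∧ As.getD i 0 = b) ∨
    (∃ i : Nat, i < As.length ∧ rp ≤ (i : Int) ∧ As.getD i 0 = b) := by
  unfold pvWin at hb
  rcases List.mem_append.mp hb with h | h
  · left
    obtain ⟨i, hi, rfl⟩ := List.getElem_of_mem h
    have hlen : i < (lp + 1).toNat ∧ i < As.length := by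
      simp only [List.length_take] at hi
      omega
    refine ⟨i, hlen.2, by omega, ?_⟩
    rw [List.getElem_take]
    simp [List.getD_eq_getElem?_getD, List.getElem?_eq_getElem hlen.2]
  · right
    obtain ⟨i, hi, rfl⟩ := List.getElem_of_mem h
    have hiA : rp.toNat + i < As.length := by
      simp only [List.length_drop] at hi
      omega
    refine ⟨rp.toNat + i, hiA, ?_, ?_⟩
    · have : rp ≤ rp.toNat := by omega
      omega
    · rw [List.getElem_drop]
      simp [List.getD_eq_getElem?_getD, List.getElem?_eq_getElem hiA]

-- both sides out of reach: no candidates remain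
theorem pvCandNil (As : List Int) (mx x lp rp : Int) (hs : As.Pairwise (· ≤ ·))
    (hW : pvW As x lp rp)
    (hI : pvLeMax (pvCdI As x lp) mx = false) (hD : pvLeMax (pvCdD As x rp) mx = false) :
    pvCand As mx x lp rp = [] := by
  obtain ⟨hlp, hlr, hrn, hL, hR⟩ := hW
  unfold pvCand
  rw [List.filter_eq_nil_iff]
  intro b hb
  simp only [decide_eq_true_eq]
  rcases pvWinMem As lp rp b hb with ⟨i, hi, hil, rfl⟩ | ⟨i, hi, hir, rfl⟩
  · have h0 : 0 ≤ lp := by omega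
    have hvI : ¬ (|As.getD lp.toNat 0 - x| ≤ mx) := by
      simpa [pvCdI, pvLeMax, h0] using hI
    have h1 : As.getD i 0 ≤ As.getD lp.toNat 0 := pvMono As hs i lp.toNat (by omega) (by omega)
    have h2 : As.getD lp.toNat 0 ≤ x := hL lp.toNat (by omega) (by omega)
    have h3 : As.getD i 0 ≤ x := hL i hi hil
    have e1 : |As.getD lp.toNat 0 - x| = x - As.getD lp.toNat 0 := by
      rw [abs_of_nonpos (by omega)]; ring
    have e2 : |As.getD i 0 - x| = x - As.getD i 0 := by
      rw [abs_of_nonpos (by omega)]; ring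
    omega
  · have hrlt : rp < (As.length : Int) := by omega
    have hvD : ¬ (|As.getD rp.toNat 0 - x| ≤ mx) := by
      simpa [pvCdD, pvLeMax, hrlt] using hD
    have h1 : As.getD rp.toNat 0 ≤ As.getD i 0 := pvMono As hs rp.toNat i (by omega) hi
    have h2 : x ≤ As.getD rp.toNat 0 := hR rp.toNat (by omega) (by omega)
    have h3 : x ≤ As.getD i 0 := hR i hi hir
    have e1 : |As.getD rp.toNat 0 - x| = As.getD rp.toNat 0 - x := abs_of_nonneg (by omega)
    have e2 : |As.getD i 0 - x| = As.getD i 0 - x := abs_of_nonneg (by omega)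
    omega

-- left element chosen: it is the minimum of the candidates under the (distance, value) key
theorem pvSwLeft (As : List Int) (mx x lp rp : Int) (hs : As.Pairwise (· ≤ ·))
    (hW : pvW As x lp rp) (h0 : 0 ≤ lp)
    (hdmax : |As.getD lp.toNat 0 - x| ≤ mx)
    (hled : pvLeInf (pvCdI As x lp) (pvCdD As x rp) = true) :
    pvSW As mx x lp rp =
      (|As.getD lp.toNat 0 - x|, As.getD lp.toNat 0) :: pvSW As mx x (lp - 1) rp := by
  obtain ⟨hlp, hlr, hrn, hL, hR⟩ := hW
  have hln : lp < (As.length : Int) := by omega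
  set a := As.getD lp.toNat 0 with hadef
  have hax : a ≤ x := hL lp.toNat (by omega) (by omega)
  refine PySem.List.eq_of_perm_of_pairwise_le_of_injective
    (fun p : Int × Int => toLex p) toLex.injective ?_ ?_ ?_
  · -- permutation
    refine (PySem.List.sorted_perm _ _ _).trans ?_
    have hcand : (pvCand As mx x lp rp).Perm (a :: pvCand As mx x (lp - 1) rp) := by
      have := (pvWinPermL As lp rp h0 hln).filter (fun b => decide (|b - x| ≤ mx))
      rwa [List.filter_cons_of_pos (by simpa using hdmax)] at this
    refine ((hcand.map _).trans ?_)
    exact List.Perm.cons _ ((PySem.List.sorted_perm _ _ _).symm)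
  · exact PySem.List.sorted_pairwise _ _
  · refine List.pairwise_cons.mpr ⟨?_, PySem.List.sorted_pairwise _ _⟩
    intro q hq
    have hq' : q ∈ (pvCand As mx x (lp - 1) rp).map (fun b => (|b - x|, b)) :=
      (PySem.List.mem_sorted _ _ _ _).mp hq
    obtain ⟨b, hbmem, rfl⟩ := List.mem_map.mp hq'
    have hbwin : b ∈ pvWin As (lp - 1) rp := List.mem_of_mem_filter hbmem
    have hgoal : |a - x| < |b - x| ∨ (|a - x| = |b - x| ∧ a ≤ b) := by
      rcases pvWinMem As (lp - 1) rp b hbwin with ⟨i, hi, hil, rfl⟩ | ⟨i, hi, hir, rfl⟩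
      · have h1 : As.getD i 0 ≤ a := pvMono As hs i lp.toNat (by omega) (by omega)
        have h2 : As.getD i 0 ≤ x := hL i hi (by omega)
        have e1 : |a - x| = x - a := by rw [abs_of_nonpos (by omega)]; ring
        have e2 : |As.getD i 0 - x| = x - As.getD i 0 := by rw [abs_of_nonpos (by omega)]; ring
        omega
      · have hrln : rp < (As.length : Int) := by omega
        have hvw : |a - x| ≤ |As.getD rp.toNat 0 - x| := by
          simpa [pvLeInf, pvCdI, pvCdD, h0, hrln] using hled
        have h1 : As.getD rp.toNat 0 ≤ As.getD i 0 := pvMono As hs rp.toNat i (by omega) hi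
        have h2 : x ≤ As.getD rp.toNat 0 := hR rp.toNat (by omega) (by omega)
        have h3 : x ≤ As.getD i 0 := hR i hi hir
        have e0 : |a - x| = x - a := by rw [abs_of_nonpos (by omega)]; ring
        have e1 : |As.getD rp.toNat 0 - x| = As.getD rp.toNat 0 - x := abs_of_nonneg (by omega)
        have e2 : |As.getD i 0 - x| = As.getD i 0 - x := abs_of_nonneg (by omega)
        omega
    rw [Prod.Lex.toLex_le_toLex]
    exact hgoal.imp id id

-- right element chosen: it is the minimum of the candidates under the (distance, value) key
theorem pvSwRight (As : List Int) (mx x lp rp : Int) (hs : As.Pairwise (· ≤ ·))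
    (hW : pvW As x lp rp) (hrn : rp < (As.length : Int))
    (hdmax : |As.getD rp.toNat 0 - x| ≤ mx)
    (hnled : pvLeInf (pvCdI As x lp) (pvCdD As x rp) = false) :
    pvSW As mx x lp rp =
      (|As.getD rp.toNat 0 - x|, As.getD rp.toNat 0) :: pvSW As mx x lp (rp + 1) := by
  obtain ⟨hlp, hlr, hrle, hL, hR⟩ := hW
  have hr0 : 0 ≤ rp := by omega
  set a := As.getD rp.toNat 0 with hadef
  have hax : x ≤ a := hR rp.toNat (by omega) (by omega)
  refine PySem.List.eq_of_perm_of_pairwise_le_of_injective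
    (fun p : Int × Int => toLex p) toLex.injective ?_ ?_ ?_
  · refine (PySem.List.sorted_perm _ _ _).trans ?_
    have hcand : (pvCand As mx x lp rp).Perm (a :: pvCand As mx x lp (rp + 1)) := by
      have := (pvWinPermR As lp rp hr0 hrn).filter (fun b => decide (|b - x| ≤ mx))
      rwa [List.filter_cons_of_pos (by simpa using hdmax)] at this
    refine ((hcand.map _).trans ?_)
    exact List.Perm.cons _ ((PySem.List.sorted_perm _ _ _).symm)
  · exact PySem.List.sorted_pairwise _ _
  · refine List.pairwise_cons.mpr ⟨?_, PySem.List.sorted_pairwise _ _⟩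
    intro q hq
    have hq' : q ∈ (pvCand As mx x lp (rp + 1)).map (fun b => (|b - x|, b)) :=
      (PySem.List.mem_sorted _ _ _ _).mp hq
    obtain ⟨b, hbmem, rfl⟩ := List.mem_map.mp hq'
    have hbwin : b ∈ pvWin As lp (rp + 1) := List.mem_of_mem_filter hbmem
    have hgoal : |a - x| < |b - x| ∨ (|a - x| = |b - x| ∧ a ≤ b) := by
      rcases pvWinMem As lp (rp + 1) b hbwin with ⟨i, hi, hil, rfl⟩ | ⟨i, hi, hir, rfl⟩
      · -- a left element remains, so difIzq was finite and strictly larger than difDer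
        have h0lp : 0 ≤ lp := by omega
        have hvw : ¬ (|As.getD lp.toNat 0 - x| ≤ |a - x|) := by
          simpa [pvLeInf, pvCdI, pvCdD, h0lp, hrn] using hnled
        have h1 : As.getD i 0 ≤ As.getD lp.toNat 0 := pvMono As hs i lp.toNat (by omega) (by omega)
        have h2 : As.getD i 0 ≤ x := hL i hi (by omega)
        have h3 : As.getD lp.toNat 0 ≤ x := hL lp.toNat (by omega) (by omega)
        have e0 : |a - x| = a - x := abs_of_nonneg (by omega)
        have e1 : |As.getD lp.toNat 0 - x| = x - As.getD lp.toNat 0 := by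
          rw [abs_of_nonpos (by omega)]; ring
        have e2 : |As.getD i 0 - x| = x - As.getD i 0 := by
          rw [abs_of_nonpos (by omega)]; ring
        omega
      · have h1 : a ≤ As.getD i 0 := pvMono As hs rp.toNat i (by omega) hi
        have h2 : x ≤ As.getD i 0 := hR i hi (by omega)
        have e0 : |a - x| = a - x := abs_of_nonneg (by omega)
        have e2 : |As.getD i 0 - x| = As.getD i 0 - x := abs_of_nonneg (by omega)
        omega
    rw [Prod.Lex.toLex_le_toLex]
    exact hgoal.imp id id

-- the emitted sequence is the take of the sorted candidate list
theorem pvEmitTake (As : List Int) (mx x : Int) (hs : As.Pairwise (· ≤ ·)) :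
    ∀ (f : Nat) (lp rp : Int), pvW As x lp rp →
    pvEmit As mx x f lp rp = ((pvSW As mx x lp rp).take f).map (fun p => p.2) := by
  intro f
  induction f with
  | zero => intro lp rp _; simp [pvEmit]
  | succ f ih =>
    intro lp rp hW
    obtain ⟨hlp, hlr, hrn, hL, hR⟩ := hW
    by_cases hc : (pvLeMax (pvCdI As x lp) mx || pvLeMax (pvCdD As x rp) mx) = true
    · by_cases hle : pvLeInf (pvCdI As x lp) (pvCdD As x rp) = true
      · have h0lp : 0 ≤ lp := by
          by_contra h
          have hI : pvCdI As x lp = none := by simp [pvCdI]; omega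
          have hD : pvCdD As x rp = none := by
            rcases hD' : pvCdD As x rp with _ | w
            · rfl
            · rw [hI, hD'] at hle; simp [pvLeInf] at hle
          rw [hI, hD] at hc; simp [pvLeMax] at hc
        have hdmax : |As.getD lp.toNat 0 - x| ≤ mx := by
          rcases Bool.or_eq_true_iff.mp hc with h | h
          · simpa [pvLeMax, pvCdI, h0lp] using h
          · have hrlt : rp < (As.length : Int) := by
              by_contra hge
              have : pvCdD As x rp = none := by simp [pvCdD]; omega
              rw [this] at h; simp [pvLeMax] at h
            have hw : |As.getD rp.toNat 0 - x| ≤ mx := by simpa [pvLeMax, pvCdD, hrlt] using h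
            have hvw : |As.getD lp.toNat 0 - x| ≤ |As.getD rp.toNat 0 - x| := by
              simpa [pvLeInf, pvCdI, pvCdD, h0lp, hrlt] using hle
            omega
        have hW' : pvW As x (lp - 1) rp :=
          ⟨by omega, by omega, hrn, fun i hi h => hL i hi (by omega), hR⟩
        rw [pvEmit, if_pos hc, if_pos hle,
          pvSwLeft As mx x lp rp hs ⟨hlp, hlr, hrn, hL, hR⟩ h0lp hdmax hle,
          List.take_succ_cons, List.map_cons, ih (lp - 1) rp hW']
      · have hle' := Bool.not_eq_true _ ▸ hle
        have hrlt : rp < (As.length : Int) := by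
          by_contra hge
          have hD : pvCdD As x rp = none := by simp [pvCdD]; omega
          rcases hI : pvCdI As x lp with _ | v
          · rw [hI, hD] at hle; simp [pvLeInf] at hle
          · rw [hI, hD] at hle; simp [pvLeInf] at hle
        have hdmax : |As.getD rp.toNat 0 - x| ≤ mx := by
          rcases Bool.or_eq_true_iff.mp hc with h | h
          · have h0lp : 0 ≤ lp := by
              by_contra hneg
              have : pvCdI As x lp = none := by simp [pvCdI]; omega
              rw [this] at h; simp [pvLeMax] at h
            have hv : |As.getD lp.toNat 0 - x| ≤ mx := by simpa [pvLeMax, pvCdI, h0lp] using h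
            have hwv : ¬ (|As.getD lp.toNat 0 - x| ≤ |As.getD rp.toNat 0 - x|) := by
              simpa [pvLeInf, pvCdI, pvCdD, h0lp, hrlt] using hle
            omega
          · simpa [pvLeMax, pvCdD, hrlt] using h
        have hW' : pvW As x lp (rp + 1) :=
          ⟨hlp, by omega, by omega, hL, fun i hi h => hR i hi (by omega)⟩
        rw [pvEmit, if_pos hc, if_neg (by simp [hle]),
          pvSwRight As mx x lp rp hs ⟨hlp, hlr, hrn, hL, hR⟩ hrlt hdmax
            (Bool.not_eq_true _ ▸ (by simp [hle])),
          List.take_succ_cons, List.map_cons, ih lp (rp + 1) hW']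
    · have hor := Bool.or_eq_false_iff.mp (Bool.not_eq_true _ ▸ hc)
      have hnil : pvSW As mx x lp rp = [] := by
        unfold pvSW
        rw [pvCandNil As mx x lp rp hs ⟨hlp, hlr, hrn, hL, hR⟩ hor.1 hor.2]
        simp [PySem.List.sorted_eq_nil_iff]
      rw [pvEmit, if_neg (by simp_all), hnil]
      simp
  
-- the real loop equals the stripped loop (fuel = num.toNat is exact)
theorem pvLoopEmit (As : List Int) (num mx x : Int) :
    ∀ (f : Nat) (vec : List Int) (lp rp : Int), pvW As x lp rp →
    vec.length + f = num.toNat →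
    fcnLoop As num mx x f vec lp rp (pvCdI As x lp) (pvCdD As x rp) =
      vec ++ pvEmit As mx x f lp rp := by
  intro f
  induction f with
  | zero => intro vec lp rp _ _; simp [fcnLoop, pvEmit]
  | succ f ih =>
    intro vec lp rp hW hlen
    obtain ⟨hlp, hlr, hrn, hL, hR⟩ := hW
    have hnum : (vec.length : Int) < num := by omega
    rw [fcnLoop, pvEmit]
    by_cases hc : (pvLeMax (pvCdI As x lp) mx || pvLeMax (pvCdD As x rp) mx) = true
    · rw [if_pos (by simp [hnum, hc])]
      rw [if_pos hc]
      by_cases hle : pvLeInf (pvCdI As x lp) (pvCdD As x rp) = true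
      · have h0lp : 0 ≤ lp := by
          by_contra h
          have hI : pvCdI As x lp = none := by simp [pvCdI]; omega
          have hD : pvCdD As x rp = none := by
            rcases hD' : pvCdD As x rp with _ | w
            · rfl
            · rw [hI, hD'] at hle; simp [pvLeInf] at hle
          rw [hI, hD] at hc; simp [pvLeMax] at hc
        rw [if_pos hle, if_pos hle]
        have hval : PySem.List.pyGetD As lp 0 = As.getD lp.toNat 0 :=
          pvGetDPos As lp h0lp (by omega)
        have hdI' : (if lp - 1 = -1 then none else pvDist? As x (lp - 1)) = pvCdI As x (lp - 1) := by
          by_cases hm : lp - 1 = -1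
          · rw [if_pos hm, pvCdI, if_neg (by omega)]
          · rw [if_neg hm]
            have h1 : 0 ≤ lp - 1 := by omega
            rw [pvDist?, pvGetPos As (lp - 1) h1 (by omega), pvCdI, if_pos h1]
            rfl
        have hW' : pvW As x (lp - 1) rp :=
          ⟨by omega, by omega, hrn, fun i hi h => hL i hi (by omega), hR⟩
        rw [hval, hdI']
        have := ih (vec ++ [As.getD lp.toNat 0]) (lp - 1) rp hW' (by simp; omega)
        rw [this, List.append_assoc]
        rfl
      · have hle' : pvLeInf (pvCdI As x lp) (pvCdD As x rp) = false := by simp [hle]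
        have hrlt : rp < (As.length : Int) := by
          by_contra hge
          have hD : pvCdD As x rp = none := by simp [pvCdD]; omega
          rcases hI : pvCdI As x lp with _ | v
          · rw [hI, hD] at hle; simp [pvLeInf] at hle
          · rw [hI, hD] at hle; simp [pvLeInf] at hle
        rw [if_neg hle, if_neg hle]
        have hval : PySem.List.pyGetD As rp 0 = As.getD rp.toNat 0 :=
          pvGetDPos As rp (by omega) hrlt
        have hdD' : (if rp + 1 = (As.length : Int) then none else pvDist? As x (rp + 1)) =
            pvCdD As x (rp + 1) := by
          by_cases hm : rp + 1 = (As.length : Int)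
          · rw [if_pos hm, pvCdD, if_neg (by omega)]
          · rw [if_neg hm]
            have h1 : rp + 1 < (As.length : Int) := by omega
            rw [pvDist?, pvGetPos As (rp + 1) (by omega) h1, pvCdD, if_pos h1]
            rfl
        have hW' : pvW As x lp (rp + 1) :=
          ⟨hlp, by omega, by omega, hL, fun i hi h => hR i hi (by omega)⟩
        rw [hval, hdD']
        have := ih (vec ++ [As.getD rp.toNat 0]) lp (rp + 1) hW' (by simp; omega)
        rw [this, List.append_assoc]
        rfl
    · rw [if_neg (by simp_all), if_neg (by simp_all)]
      simp

-- ===== VERDICT (by name: the statement is the Claim_ definition above) =====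
theorem findClosestNeighbors_spec : Claim_equal_findClosestNeighbors := by
  intro A num mx x hDom hPre
  unfold Spec_findClosestNeighbors
  obtain ⟨hne, a, ha, hax⟩ := hPre
  simp only [findClosestNeighbors, findClosestNeighbors_alt]
  have hs : (PySem.List.sorted A (fun a => a)).Pairwise (· ≤ ·) := by
    simpa using PySem.List.sorted_pairwise A (fun a => a)
  have hperm : (PySem.List.sorted A (fun a => a)).Perm A :=
    PySem.List.sorted_perm A (fun a => a) false
  set As := PySem.List.sorted A (fun a => a) with hAsdef
  have hmem : a ∈ As := (hperm.mem_iff).mpr ha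
  obtain ⟨hj0, hjle, hLB, hRB, hjlt'⟩ := pvIndexSpec As x hs
  set j := BinarioModificacion As x with hjdef
  have hjlt : j < (As.length : Int) := hjlt' ⟨a, hmem, hax⟩
  have hW : pvW As x (j - 1) j := ⟨by omega, by omega, by omega,
    fun i hi h => hLB i hi (by omega), fun i hi h => hRB i hi h⟩
  have hdD : pvDist? As x j = pvCdD As x j := by
    rw [pvDist?, pvGetPos As j hj0 hjlt, pvCdD, if_pos hjlt]; rfl
  have hdI : (if j - 1 ≥ 0 then pvDist? As x (j - 1) else none) = pvCdI As x (j - 1) := by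
    by_cases h : 0 ≤ j - 1
    · rw [if_pos (by omega : j - 1 ≥ 0), pvDist?, pvGetPos As (j - 1) h (by omega),
        pvCdI, if_pos h]
      rfl
    · rw [if_neg (by omega), pvCdI, if_neg h]
  rw [hdI, hdD,
    pvLoopEmit As num mx x num.toNat [] (j - 1) j hW (by simp),
    pvEmitTake As mx x hs num.toNat (j - 1) j hW]
  have hSW : pvSW As mx x (j - 1) j =
      PySem.List.sorted ((A.filter (fun b => decide (|b - x| ≤ mx))).map (fun b => (|b - x|, b)))
        (fun p => toLex p) := by
    unfold pvSW pvCand pvWin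
    have h1 : (j - 1 + 1).toNat = j.toNat := by omega
    rw [h1, List.take_append_drop]
    exact PySem.List.sorted_eq_sorted_of_perm _ _ _ toLex.injective ((hperm.filter _).map _)
  have hk : (if num > 0 then num else 0).toNat = num.toNat := by
    by_cases h : num > 0
    · simp [h]
    · simp [h]; omega
  rw [hSW, hk]
  simp

theorem findClosestNeighbors_raises : Claim_raises_findClosestNeighbors := by
  unfold Claim_raises_findClosestNeighbors
  exact ⟨by
    intro A num mx x hDom hR hP
    obtain ⟨hne, a, ha, hax⟩ := hP
    rcases hR with h | h
    · exact hne h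
    · exact absurd hax (not_le.mpr (h a ha)), by decide⟩

-- self-check: the recorded crash-fix witness really lies in the stated raise region and
-- B's port returns the recorded value there (projected out of findClosestNeighbors_raises)
theorem pvRaiseWitness_ok :
    Raises_findClosestNeighbors (pvRaiseWitness_findClosestNeighbors.1)
      (pvRaiseWitness_findClosestNeighbors.2.1) (pvRaiseWitness_findClosestNeighbors.2.2.1)
      (pvRaiseWitness_findClosestNeighbors.2.2.2) ∧
    findClosestNeighbors_alt (pvRaiseWitness_findClosestNeighbors.1)
      (pvRaiseWitness_findClosestNeighbors.2.1) (pvRaiseWitness_findClosestNeighbors.2.2.1)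
      (pvRaiseWitness_findClosestNeighbors.2.2.2) = pvRaiseWitnessOut_findClosestNeighbors := by
  have h := findClosestNeighbors_raises
  unfold Claim_raises_findClosestNeighbors at h
  exact ⟨h.2.2.1, h.2.2.2⟩
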